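-- pv_equiv track=rewrite | github.com/abduqah/problem-solving | min-abs-sum.py | remove_max
-- ===== SOURCE A (Python) =====
-- def remove_max(arr):
--   m = max(arr)
--   temp = m
--   arr.remove(m)
--   for i in reversed(range(m)):
--     if i > temp: continue
--     if i in arr :
--       temp -= i
--       arr.remove(i)
--
--   if temp > 0:
--     arr.append(temp)
--
--   return arr
-- ===== SOURCE B (Python) =====
-- def remove_max(arr):
--   m = max(arr)
--   temp = m
--   chosen = []
--   for v in sorted({v for v in arr if 0 <= v < m}, reverse=True):
--     if v <= temp:
--       temp -= v
--       chosen.append(v)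
--   skip = set(chosen)
--   skip.add(m)
--   out = []
--   for x in arr:
--     if x in skip:
--       skip.discard(x)
--     else:
--       out.append(x)
--   if temp > 0:
--     out.append(temp)
--   arr[:] = out
--   return arr
-- ===== Notes on version B (the rewrite author's own statement) =====
-- stated objective: alternative
-- what changed: A scans every integer below max(arr) with an O(n) membership/remove per step; B greedily picks from the distinct nonnegative present values sorted descending and then rebuilds the list in one pass skipping the first occurrence of each picked value, so its cost is O(n log n) independent of the magnitude of max(arr).
-- outside the precondition, e.g. on remove_max([]): A raises ValueError, B raises ValueError
import Mathlib
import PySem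

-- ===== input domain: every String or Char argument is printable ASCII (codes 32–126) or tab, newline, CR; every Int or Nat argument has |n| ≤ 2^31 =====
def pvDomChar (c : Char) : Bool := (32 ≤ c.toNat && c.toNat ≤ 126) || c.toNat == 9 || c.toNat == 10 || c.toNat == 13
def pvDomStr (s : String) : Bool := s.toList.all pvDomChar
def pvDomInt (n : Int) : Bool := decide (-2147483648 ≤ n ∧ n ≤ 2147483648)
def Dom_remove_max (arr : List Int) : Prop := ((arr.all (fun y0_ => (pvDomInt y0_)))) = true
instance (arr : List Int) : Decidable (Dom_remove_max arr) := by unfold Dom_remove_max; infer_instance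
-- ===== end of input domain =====

-- B replaces A's countdown over every integer below max(arr) by a greedy pick from the distinct
-- nonnegative values actually present (sorted descending) followed by a single rebuild pass that
-- skips the first occurrence of each picked value, so B's work does not iterate over the magnitude
-- of max(arr). Both Pythons mutate arr to the same final contents and return it; the equivalence
-- proved here is about the return value.

-- ===== PORT A =====
-- loop body of 'for i in reversed(range(m))'
def pvStepA (st : Int × List Int) (i : Int) : Int × List Int :=
  if i > st.1 then st
  else if i ∈ st.2 then (st.1 - i, (PySem.List.remove? st.2 i).getD st.2)
  else st

def remove_max (arr : List Int) : List Int :=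
  match PySem.List.max? arr (fun x => x) with
  | none => []   -- Python: max([]) raises ValueError; excluded by Pre_remove_max
  | some m =>
    -- arr.remove(m): m ∈ arr always holds here, getD is never the fallback
    let arr1 := (PySem.List.remove? arr m).getD arr
    let s := ((PySem.List.pyRange 0 m 1).reverse).foldl pvStepA (m, arr1)
    if s.1 > 0 then s.2 ++ [s.1] else s.2

-- ===== PORT B =====
-- loop body of 'for v in sorted(..., reverse=True)': greedily pick v, collecting it
def pvPick (st : Int × List Int) (v : Int) : Int × List Int :=
  if v ≤ st.1 then (st.1 - v, st.2 ++ [v]) else st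

-- 'for x in arr: if x in skip: skip.discard(x) else: out.append(x)'
def pvRebuild : List Int → PySem.Set Int → List Int
  | [], _ => []
  | x :: xs, skip =>
    if x ∈ skip then pvRebuild xs (PySem.Set.discard skip x)
    else x :: pvRebuild xs skip

def remove_max_alt (arr : List Int) : List Int :=
  match PySem.List.max? arr (fun x => x) with
  | none => []   -- Python: max([]) raises ValueError; excluded by Pre_remove_max
  | some m =>
    let cands := PySem.List.sorted
      (PySem.Set.ofList (arr.filter (fun v => decide (0 ≤ v) && decide (v < m))))
      (fun x => x) true
    let p := cands.foldl pvPick (m, [])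
    let skip := PySem.Set.add (PySem.Set.ofList p.2) m
    let out := pvRebuild arr skip
    if p.1 > 0 then out ++ [p.1] else out

-- ===== PRECONDITION & SPEC =====
-- Pre_ excludes only the empty list, on which Python's max([]) raises ValueError.
def Pre_remove_max (arr : List Int) : Prop := arr ≠ []
instance (arr : List Int) : Decidable (Pre_remove_max arr) := by unfold Pre_remove_max; infer_instance
def pvWitness_remove_max : List Int := [2, 1, 1]

def Spec_remove_max (arr : List Int) (out : List Int) : Prop := out = remove_max_alt arr
instance (arr : List Int) (out : List Int) : Decidable (Spec_remove_max arr out) := by unfold Spec_remove_max; infer_instance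

-- ===== CLAIM (what is proved, stated in full; the proofs are below) =====
def Claim_equal_remove_max : Prop := ∀ (arr : List Int), Dom_remove_max arr → Pre_remove_max arr → Spec_remove_max arr (remove_max arr)

-- ===== LEMMAS AND PROOFS =====

-- remove the first occurrence of each element of ch from l, in order
def pvEraseAll (l : List Int) (ch : List Int) : List Int := ch.foldl List.erase l

theorem pv_mem_of_mem_removeD {l : List Int} {v x : Int}
    (hx : x ∈ (PySem.List.remove? l v).getD l) : x ∈ l := by
  by_cases hv : v ∈ l
  · rw [PySem.List.remove?_eq_some_erase l v hv] at hx
    exact List.mem_of_mem_erase hx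
  · rwa [(PySem.List.remove?_eq_none_iff l v).mpr hv] at hx

-- A's step never adds values
theorem pvStepA_subset {l0 : List Int} {st : Int × List Int} (h : ∀ x ∈ st.2, x ∈ l0)
    (i : Int) : ∀ x ∈ (pvStepA st i).2, x ∈ l0 := by
  intro x hx
  unfold pvStepA at hx
  split_ifs at hx with h1 h2
  · exact h x hx
  · exact h x (pv_mem_of_mem_removeD hx)
  · exact h x hx

-- Step 1: values absent from the initial list can be dropped from A's iteration
theorem pv_foldA_filter (L : List Int) (l0 : List Int) :
    ∀ (st : Int × List Int), (∀ x ∈ st.2, x ∈ l0) →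
    L.foldl pvStepA st = (L.filter (fun i => decide (i ∈ l0))).foldl pvStepA st := by
  induction L with
  | nil => intro st _; rfl
  | cons i L ih =>
    intro st h
    by_cases hi : i ∈ l0
    · simp only [List.foldl_cons, List.filter_cons, hi, decide_true]
      exact ih _ (pvStepA_subset h i)
    · have hid : pvStepA st i = st := by
        unfold pvStepA
        have hin : i ∉ st.2 := fun hm => hi (h i hm)
        by_cases h1 : i > st.1
        · rw [if_pos h1]
        · rw [if_neg h1, if_neg hin]
      simp only [List.foldl_cons, List.filter_cons, hi, decide_false, hid]
      exact ih _ h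

-- Step 2: A's filtered countdown is exactly B's reverse-sorted candidate set
theorem pv_countdown_eq_cands (m : Int) (arr : List Int) (hm : m ∈ arr) :
    ((PySem.List.pyRange 0 m 1).reverse).filter
        (fun i => decide (i ∈ (PySem.List.remove? arr m).getD arr)) =
    PySem.List.sorted
      (PySem.Set.ofList (arr.filter (fun v => decide (0 ≤ v) && decide (v < m))))
      (fun x => x) true := by
  have hrest : (PySem.List.remove? arr m).getD arr = arr.erase m := by
    rw [PySem.List.remove?_eq_some_erase arr m hm]; rfl
  set X := PySem.Set.ofList (arr.filter (fun v => decide (0 ≤ v) && decide (v < m))) with hX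
  set lhs := ((PySem.List.pyRange 0 m 1).reverse).filter
      (fun i => decide (i ∈ (PySem.List.remove? arr m).getD arr)) with hlhs
  set rhs := PySem.List.sorted X (fun x => x) true with hrhs
  have hndX : X.Nodup := PySem.Set.nodup_ofList _
  have hndL : lhs.Nodup :=
    List.Nodup.filter _ (List.nodup_reverse.mpr (PySem.List.nodup_pyRange_one 0 m))
  have hndR : rhs.Nodup := ((PySem.List.sorted_perm X (fun x => x) true).nodup_iff).mpr hndX
  have hmemL : ∀ x, x ∈ lhs ↔ (0 ≤ x ∧ x < m) ∧ x ∈ arr.erase m := by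
    intro x
    simp [hlhs, List.mem_filter, PySem.List.mem_pyRange_one, hrest]
  have hmemR : ∀ x, x ∈ rhs ↔ (0 ≤ x ∧ x < m) ∧ x ∈ arr.erase m := by
    intro x
    rw [hrhs, PySem.List.mem_sorted, hX, PySem.Set.mem_ofList, List.mem_filter]
    constructor
    · rintro ⟨hxa, hb⟩
      simp only [Bool.and_eq_true, decide_eq_true_eq] at hb
      exact ⟨⟨hb.1, hb.2⟩, (List.mem_erase_of_ne (by omega)).mpr hxa⟩
    · rintro ⟨⟨h0, h1⟩, hxe⟩
      exact ⟨List.mem_of_mem_erase hxe, by simp [h0, h1]⟩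
  have hperm : rhs.Perm lhs := by
    rw [List.perm_ext_iff_of_nodup hndR hndL]
    intro x; rw [hmemL x, hmemR x]
  have hsortR : rhs.Pairwise (fun a b : Int => b ≤ a) :=
    PySem.List.sorted_pairwise_rev X (fun x => x)
  have hsortL : lhs.Pairwise (fun a b : Int => b ≤ a) := by
    have h1 : ((PySem.List.pyRange 0 m 1).reverse).Pairwise (fun a b : Int => b ≤ a) := by
      rw [List.pairwise_reverse]
      exact (PySem.List.pairwise_lt_pyRange_one 0 m).imp (fun h => le_of_lt h)
    exact h1.filter _
  exact (List.Perm.eq_of_pairwise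
    (fun a b _ _ h1 h2 => le_antisymm h2 h1) hsortR hsortL hperm).symm

-- the pick fold's accumulator just prefixes what starts from []
theorem pvPick_acc (X : List Int) : ∀ (t : Int) (c : List Int),
    X.foldl pvPick (t, c) =
      ((X.foldl pvPick (t, [])).1, c ++ (X.foldl pvPick (t, [])).2) := by
  induction X with
  | nil => intro t c; simp
  | cons v X ih =>
    intro t c
    by_cases hv : v ≤ t
    · simp only [List.foldl_cons, pvPick, if_pos hv, List.nil_append]
      rw [ih (t - v) (c ++ [v]), ih (t - v) [v]]
      simp
    · simp only [List.foldl_cons, pvPick, if_neg hv]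
      exact ih t c

-- the picked values form a sublist of the candidate list
theorem pvPick_sublist (X : List Int) : ∀ (t : Int),
    (X.foldl pvPick (t, [])).2.Sublist X := by
  induction X with
  | nil => intro t; simp
  | cons v X ih =>
    intro t
    by_cases hv : v ≤ t
    · simp only [List.foldl_cons, pvPick, if_pos hv, List.nil_append]
      rw [pvPick_acc X (t - v) [v]]
      exact List.Sublist.cons₂ v (ih (t - v))
    · simp only [List.foldl_cons, pvPick, if_neg hv]
      exact (ih t).cons v

-- Step 3: A's destructive fold = B's pick fold followed by erasing the picked values
theorem pv_foldA_eq_pick (X : List Int) : ∀ (t : Int) (l : List Int),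
    X.Nodup → (∀ v ∈ X, v ∈ l) →
    X.foldl pvStepA (t, l) =
      ((X.foldl pvPick (t, [])).1, pvEraseAll l (X.foldl pvPick (t, [])).2) := by
  induction X with
  | nil => intro t l _ _; rfl
  | cons v X ih =>
    intro t l hnd hmem
    have hv : v ∈ l := hmem v (List.mem_cons_self ..)
    have hnd' := (List.nodup_cons.mp hnd).2
    have hvX := (List.nodup_cons.mp hnd).1
    by_cases ht : v ≤ t
    · have hA : pvStepA (t, l) v = (t - v, l.erase v) := by
        unfold pvStepA
        rw [if_neg (by omega : ¬ v > t), if_pos hv,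
          PySem.List.remove?_eq_some_erase l v hv]
        rfl
      simp only [List.foldl_cons, hA, pvPick, if_pos ht]
      rw [ih (t - v) (l.erase v) hnd'
        (fun w hw => (List.mem_erase_of_ne (by intro he; exact hvX (he ▸ hw))).mpr
          (hmem w (List.mem_cons_of_mem _ hw)))]
      simp only [List.nil_append]
      rw [pvPick_acc X (t - v) [v]]
      rfl
    · have hA : pvStepA (t, l) v = (t, l) := by
        unfold pvStepA; rw [if_pos (by omega : v > t)]
      simp only [List.foldl_cons, hA, pvPick, if_neg ht]
      exact ih t l hnd' (fun w hw => hmem w (List.mem_cons_of_mem _ hw))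

-- discard on a duplicate-free set is List.erase
theorem pv_discard_eq_erase {S : List Int} (x : Int) (h : S.Nodup) :
    PySem.Set.discard S x = S.erase x := by
  induction S with
  | nil => rfl
  | cons a S ih =>
    by_cases ha : a = x
    · subst ha
      have haS : a ∉ S := (List.nodup_cons.mp h).1
      rw [List.erase_cons_head]
      show List.filter (fun y => !y == a) (a :: S) = S
      rw [List.filter_cons_of_neg (by simp)]
      refine List.filter_eq_self.mpr (fun b hb => ?_)
      simp only [Bool.not_eq_eq_eq_not, Bool.not_true, beq_eq_false_iff_ne, ne_eq]
      intro he; exact haS (he ▸ hb)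
    · show List.filter (fun y => !y == x) (a :: S) = (a :: S).erase x
      rw [List.filter_cons_of_pos (by simp [ha]),
        List.erase_cons_tail (by simp; exact ha)]
      exact congrArg (List.cons a) (ih (List.nodup_cons.mp h).2)

theorem pv_eraseAll_nil (S : List Int) : pvEraseAll [] S = [] := by
  induction S with
  | nil => rfl
  | cons v S ih => simpa [pvEraseAll] using ih

theorem pv_eraseAll_cons_not_mem (S : List Int) : ∀ (x : Int) (xs : List Int), x ∉ S →
    pvEraseAll (x :: xs) S = x :: pvEraseAll xs S := by
  induction S with
  | nil => intro x xs _; rfl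
  | cons v S ih =>
    intro x xs hx
    have hvx : v ≠ x := fun he => hx (he ▸ List.mem_cons_self ..)
    have hstep : (x :: xs).erase v = x :: xs.erase v :=
      List.erase_cons_tail (by simp; intro he; exact hvx he.symm)
    simp only [pvEraseAll, List.foldl_cons, hstep]
    exact ih x (xs.erase v) (fun h => hx (List.mem_cons_of_mem _ h))

theorem pv_eraseAll_cons_mem (S : List Int) : ∀ (x : Int) (xs : List Int),
    S.Nodup → x ∈ S →
    pvEraseAll (x :: xs) S = pvEraseAll xs (S.erase x) := by
  induction S with
  | nil => intro x xs _ hx; cases hx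
  | cons v S ih =>
    intro x xs hnd hx
    by_cases hvx : v = x
    · subst hvx
      simp only [pvEraseAll, List.foldl_cons, List.erase_cons_head]
    · have hxS : x ∈ S := by
        cases hx with
        | head => exact absurd rfl hvx
        | tail _ h => exact h
      have hnd' := (List.nodup_cons.mp hnd).2
      have h1 : (x :: xs).erase v = x :: xs.erase v :=
        List.erase_cons_tail (by simp; intro he; exact hvx he.symm)
      have h2 : (v :: S).erase x = v :: S.erase x :=
        List.erase_cons_tail (by simp; exact hvx)
      simp only [pvEraseAll, List.foldl_cons, h1, h2]
      exact ih x (xs.erase v) hnd' hxS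

-- Step 4: the rebuild pass erases the first occurrence of each skip value
theorem pv_rebuild_eq_eraseAll (l : List Int) : ∀ (S : PySem.Set Int), S.Nodup →
    pvRebuild l S = pvEraseAll l S := by
  induction l with
  | nil => intro S _; rw [pv_eraseAll_nil]; rfl
  | cons x xs ih =>
    intro S hnd
    by_cases hx : x ∈ S
    · rw [pvRebuild, if_pos hx, ih _ (by rw [pv_discard_eq_erase x hnd]; exact hnd.erase x),
        pv_discard_eq_erase x hnd, pv_eraseAll_cons_mem S x xs hnd hx]
    · rw [pvRebuild, if_neg hx, ih _ hnd, pv_eraseAll_cons_not_mem S x xs hx]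

-- erasing commutes with erasing a list of values
theorem pv_eraseAll_erase_comm (ch : List Int) : ∀ (l : List Int) (a : Int),
    pvEraseAll (l.erase a) ch = (pvEraseAll l ch).erase a := by
  induction ch with
  | nil => intro l a; rfl
  | cons v ch ih =>
    intro l a
    simp only [pvEraseAll, List.foldl_cons]
    rw [List.erase_comm]
    exact ih (l.erase v) a

theorem pv_eraseAll_append_singleton (l ch : List Int) (a : Int) :
    pvEraseAll l (ch ++ [a]) = (pvEraseAll l ch).erase a := by
  simp [pvEraseAll, List.foldl_append]

-- ===== VERDICT (by name: the statement is the Claim_ definition above) =====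
theorem remove_max_spec : Claim_equal_remove_max := by
  intro arr _ hpre
  unfold Spec_remove_max remove_max remove_max_alt
  cases hmax : PySem.List.max? arr (fun x => x) with
  | none => rfl
  | some m =>
    simp only
    have hm : m ∈ arr := PySem.List.max?_mem hmax
    have hrest : (PySem.List.remove? arr m).getD arr = arr.erase m := by
      rw [PySem.List.remove?_eq_some_erase arr m hm]; rfl
    set cands := PySem.List.sorted
      (PySem.Set.ofList (arr.filter (fun v => decide (0 ≤ v) && decide (v < m))))
      (fun x => x) true with hcands
    set p := cands.foldl pvPick (m, []) with hp
    have hndc : cands.Nodup :=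
      ((PySem.List.sorted_perm _ (fun x => x) true).nodup_iff).mpr (PySem.Set.nodup_ofList _)
    have hcv : ∀ v ∈ cands, v ∈ arr ∧ 0 ≤ v ∧ v < m := by
      intro v hv
      rw [hcands, PySem.List.mem_sorted, PySem.Set.mem_ofList, List.mem_filter] at hv
      simp only [Bool.and_eq_true, decide_eq_true_eq] at hv
      exact ⟨hv.1, hv.2⟩
    -- A's fold = pick fold + erasures
    have hA : ((PySem.List.pyRange 0 m 1).reverse).foldl pvStepA
        (m, (PySem.List.remove? arr m).getD arr) = (p.1, pvEraseAll (arr.erase m) p.2) := by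
      rw [pv_foldA_filter _ ((PySem.List.remove? arr m).getD arr) _ (fun x hx => hx),
        pv_countdown_eq_cands m arr hm, ← hcands, hrest]
      exact pv_foldA_eq_pick cands m (arr.erase m) hndc
        (fun v hv => (List.mem_erase_of_ne (by have := (hcv v hv).2.2; omega)).mpr (hcv v hv).1)
    -- p.2 facts
    have hsub : p.2.Sublist cands := pvPick_sublist cands m
    have hndp : p.2.Nodup := hsub.nodup hndc
    have hmp : m ∉ p.2 := fun h => by
      have := (hcv m (hsub.subset h)).2.2; omega
    -- B's skip set is literally p.2 ++ [m]
    have hofp : PySem.Set.ofList p.2 = p.2 := PySem.Set.ofList_eq_self_of_nodup _ hndp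
    have hskip : PySem.Set.add (PySem.Set.ofList p.2) m = p.2 ++ [m] := by
      rw [hofp]; exact PySem.Set.add_of_not_mem hmp
    have hndskip : (p.2 ++ [m]).Nodup := by
      simp only [List.nodup_append, List.nodup_cons, List.not_mem_nil, List.nodup_nil]
      refine ⟨hndp, by simp, ?_⟩
      intro a ha b hb
      rw [List.mem_singleton] at hb
      subst hb
      intro he
      exact hmp (he ▸ ha)
    -- B's rebuild = A's resulting list
    have hB : pvRebuild arr (PySem.Set.add (PySem.Set.ofList p.2) m) =
        pvEraseAll (arr.erase m) p.2 := by
      rw [hskip, pv_rebuild_eq_eraseAll arr _ hndskip, pv_eraseAll_append_singleton,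
        ← pv_eraseAll_erase_comm]
    rw [hA, hB]
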